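-- pv_equiv track=rewrite | github.com/wyk18703232953/myResearch | codeComplex/data/filteredData/python/np/python_np_0358.py | solve_single
-- ===== SOURCE A (Python) =====
-- def solve_single(A):
--     n = len(A)
--     m = len(A[0]) if n > 0 else 0
--
--     # 转置得到列列表 B
--     B = [[A[i][j] for i in range(n)] for j in range(m)]
--
--     # 按列最大值排序，取前 n 列
--     B.sort(key=lambda x: max(x), reverse=True)
--     B = B[:n]
--     LEN = len(B)
--
--     if LEN == 0:
--         return 0
--
--     if LEN == 1:
--         return sum(B[0])
--
--     if LEN == 2:
--         ans = 0
--         for shift1 in range(n):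
--             cur = 0
--             for k in range(n):
--                 cur += max(B[0][k], B[1][(shift1 + k) % n])
--             ans = max(ans, cur)
--         return ans
--
--     if LEN == 3:
--         ans = 0
--         for shift1 in range(n):
--             for shift2 in range(n):
--                 cur = 0
--                 for k in range(n):
--                     cur += max(
--                         B[0][k],
--                         B[1][(shift1 + k) % n],
--                         B[2][(shift2 + k) % n],
--                     )
--                 ans = max(ans, cur)
--         return ans
--
--     # LEN >= 4 的情况只用前 4 列
--     LEN = min(LEN, 4)
--     B = B[:LEN]
--
--     if LEN == 4:
--         ans = 0
--         for shift1 in range(n):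
--             for shift2 in range(n):
--                 for shift3 in range(n):
--                     cur = 0
--                     for k in range(n):
--                         cur += max(
--                             B[0][k],
--                             B[1][(shift1 + k) % n],
--                             B[2][(shift2 + k) % n],
--                             B[3][(shift3 + k) % n],
--                         )
--                     ans = max(ans, cur)
--         return ans
--
--     # 理论上不会走到这里
--     return 0
-- ===== SOURCE B (Python) =====
-- def solve_single(A):
--     n = len(A)
--     m = len(A[0]) if n else 0
--     cols = sorted(([row[j] for row in A] for j in range(m)), key=max, reverse=True)[:n][:4]
--     L = len(cols)
--     if L == 0:
--         return 0
--     if L == 1: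
--         return sum(cols[0])
--
--     def best(shifted, remaining):
--         # shifted: columns already rotated into place; remaining: columns still to rotate
--         if not remaining:
--             return sum(max(col[k] for col in shifted) for k in range(n))
--         first, rest = remaining[0], remaining[1:]
--         return max(best(shifted + [[first[(s + k) % n] for k in range(n)]], rest)
--                    for s in range(n))
--
--     return max(0, best([cols[0]], cols[1:]))
-- ===== Notes on version B (the rewrite author's own statement) =====
-- stated objective: simpler
-- what changed: A's four hard-coded length-specific branch blocks (1/2/3/4 columns, each with its own nest of shift loops) are replaced by one generic recursion that rotates the remaining columns one at a time and takes the max at the leaves; the shared transpose/sort/truncate preparation is kept.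
import Mathlib
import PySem

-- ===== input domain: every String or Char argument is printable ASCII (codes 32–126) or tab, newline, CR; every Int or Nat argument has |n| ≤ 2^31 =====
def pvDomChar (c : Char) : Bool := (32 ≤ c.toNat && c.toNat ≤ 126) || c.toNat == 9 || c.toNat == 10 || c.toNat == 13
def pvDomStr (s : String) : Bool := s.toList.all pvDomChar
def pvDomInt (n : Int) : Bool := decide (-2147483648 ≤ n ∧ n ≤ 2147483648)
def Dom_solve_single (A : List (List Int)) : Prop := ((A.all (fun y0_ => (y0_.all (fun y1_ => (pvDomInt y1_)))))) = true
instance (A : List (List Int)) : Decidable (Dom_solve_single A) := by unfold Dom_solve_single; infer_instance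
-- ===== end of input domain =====

-- B replaces A's four length-specific branch blocks by one generic recursion over the
-- (at most 3) rotated columns; objective: simpler. Both programs share the same
-- transpose/sort/truncate preparation, ported once as pvPrep.

-- ===== PORT A =====
-- shared preparation (identical in both Pythons): transpose, sort columns by max
-- descending (stable), keep the first n columns
def pvColMax (c : List Int) : Int := (PySem.List.max? c (fun x => x)).getD 0  -- max(c); every built column is nonempty under Pre_

def pvPrep (A : List (List Int)) : List (List Int) :=
  (PySem.List.sorted
    ((List.range (if 0 < A.length then (A.headD []).length else 0)).map
      (fun j => (List.range A.length).map (fun i => (A.getD i []).getD j 0)))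
    pvColMax true).take A.length

def pvGet (B : List (List Int)) (i k : Nat) : Int := (B.getD i []).getD k 0

def solve_single (A : List (List Int)) : Int :=
  if (pvPrep A).length = 0 then 0
  else if (pvPrep A).length = 1 then ((pvPrep A).getD 0 []).sum
  else if (pvPrep A).length = 2 then
    (List.range A.length).foldl (fun ans s1 =>
      max ans ((List.range A.length).foldl (fun cur k =>
        cur + max (pvGet (pvPrep A) 0 k) (pvGet (pvPrep A) 1 ((s1 + k) % A.length))) 0)) 0
  else if (pvPrep A).length = 3 then
    (List.range A.length).foldl (fun ans s1 =>
      (List.range A.length).foldl (fun ans s2 =>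
        max ans ((List.range A.length).foldl (fun cur k =>
          cur + max (max (pvGet (pvPrep A) 0 k) (pvGet (pvPrep A) 1 ((s1 + k) % A.length)))
                    (pvGet (pvPrep A) 2 ((s2 + k) % A.length))) 0)) ans) 0
  else if min (pvPrep A).length 4 = 4 then
    (List.range A.length).foldl (fun ans s1 =>
      (List.range A.length).foldl (fun ans s2 =>
        (List.range A.length).foldl (fun ans s3 =>
          max ans ((List.range A.length).foldl (fun cur k =>
            cur + max (max (max (pvGet ((pvPrep A).take 4) 0 k)
                                (pvGet ((pvPrep A).take 4) 1 ((s1 + k) % A.length)))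
                           (pvGet ((pvPrep A).take 4) 2 ((s2 + k) % A.length)))
                      (pvGet ((pvPrep A).take 4) 3 ((s3 + k) % A.length))) 0)) ans) ans) 0
  else 0

-- ===== PORT B =====
def pvRot (c : List Int) (s n : Nat) : List Int :=
  (List.range n).map (fun k => c.getD ((s + k) % n) 0)

-- max(...) over a nonempty generator (the [] case is unreachable)
def pvMaxNE (l : List Int) : Int :=
  match l with
  | [] => 0
  | x :: xs => xs.foldl max x

def pvBest (n : Nat) (shifted : List (List Int)) : List (List Int) → Int
  | [] => ((List.range n).map (fun k => pvMaxNE (shifted.map (fun c => c.getD k 0)))).sum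
  | first :: rest =>
      pvMaxNE ((List.range n).map (fun s => pvBest n (shifted ++ [pvRot first s n]) rest))

def solve_single_alt (A : List (List Int)) : Int :=
  match (pvPrep A).take 4 with
  | [] => 0
  | [c0] => c0.sum
  | c0 :: rest => max 0 (pvBest A.length [c0] rest)

-- ===== PRECONDITION & SPEC =====
-- Pre_ excludes exactly the inputs where A raises IndexError: a row shorter than the
-- first row (the transpose indexes every row up to len(A[0])).
def Pre_solve_single (A : List (List Int)) : Prop :=
  ∀ row ∈ A, (A.headD []).length ≤ row.length
instance (A : List (List Int)) : Decidable (Pre_solve_single A) := by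
  unfold Pre_solve_single; infer_instance

def pvWitness_solve_single : List (List Int) := [[1, 2], [3, 4]]

def Spec_solve_single (A : List (List Int)) (out : Int) : Prop := out = solve_single_alt A
instance (A : List (List Int)) (out : Int) : Decidable (Spec_solve_single A out) := by
  unfold Spec_solve_single; infer_instance

-- ===== CLAIM (what is proved, stated in full; the proofs are below) =====
def Claim_equal_solve_single : Prop :=
  ∀ (A : List (List Int)), Dom_solve_single A → Pre_solve_single A →
    Spec_solve_single A (solve_single A)

-- ===== LEMMAS AND PROOFS =====

lemma pv_foldl_max_map {α : Type} (f : α → Int) (l : List α) (i : Int) :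
    l.foldl (fun a x => max a (f x)) i = (l.map f).foldl max i := by
  induction l generalizing i with
  | nil => rfl
  | cons x xs ih => simp [List.foldl_cons, ih]

lemma pv_foldl_max_pull (xs : List Int) (i x : Int) :
    xs.foldl max (max i x) = max i (xs.foldl max x) := by
  induction xs generalizing x with
  | nil => simp
  | cons y ys ih => simp only [List.foldl_cons]; rw [max_assoc, ih]

lemma pv_foldl_max_ne (l : List Int) (i : Int) (h : l ≠ []) :
    l.foldl max i = max i (pvMaxNE l) := by
  cases l with
  | nil => exact absurd rfl h
  | cons x xs => simp only [List.foldl_cons, pvMaxNE]; exact pv_foldl_max_pull xs i x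

lemma pv_foldl_maxify (f : Nat → Int) (n : Nat) (hn : 0 < n) (i : Int) :
    (List.range n).foldl (fun a s => max a (f s)) i
      = max i (pvMaxNE ((List.range n).map f)) := by
  rw [pv_foldl_max_map]
  exact pv_foldl_max_ne _ _ (by simp [List.map_eq_nil_iff, List.range_eq_nil]; omega)

lemma pv_foldl_add_map {α : Type} (g : α → Int) (l : List α) (i : Int) :
    l.foldl (fun c k => c + g k) i = i + (l.map g).sum := by
  induction l generalizing i with
  | nil => simp
  | cons x xs ih => simp [List.foldl_cons, ih]; ring

lemma pv_rot_getD (col : List Int) (s n k : Nat) (hk : k < n) :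
    (pvRot col s n)[k]?.getD 0 = col[(s + k) % n]?.getD 0 := by
  simp [pvRot, hk]

lemma pv_leaf2 (n : Nat) (b0 b1 : List Int) (s1 : Nat) :
    (List.range n).foldl (fun cur k =>
        cur + max (b0[k]?.getD 0) (b1[(s1 + k) % n]?.getD 0)) 0
      = pvBest n [b0, pvRot b1 s1 n] [] := by
  rw [pv_foldl_add_map]
  simp only [pvBest, zero_add]
  congr 1
  apply List.map_congr_left
  intro k hk
  have hk' : k < n := List.mem_range.mp hk
  simp [pvMaxNE, List.getD_eq_getElem?_getD, pv_rot_getD _ _ _ _ hk']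

lemma pv_leaf3 (n : Nat) (b0 b1 b2 : List Int) (s1 s2 : Nat) :
    (List.range n).foldl (fun cur k =>
        cur + max (b0[k]?.getD 0) (max (b1[(s1 + k) % n]?.getD 0) (b2[(s2 + k) % n]?.getD 0))) 0
      = pvBest n [b0, pvRot b1 s1 n, pvRot b2 s2 n] [] := by
  rw [pv_foldl_add_map]
  simp only [pvBest, zero_add]
  congr 1
  apply List.map_congr_left
  intro k hk
  have hk' : k < n := List.mem_range.mp hk
  simp [pvMaxNE, List.getD_eq_getElem?_getD, pv_rot_getD _ _ _ _ hk', max_assoc]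

lemma pv_leaf4 (n : Nat) (b0 b1 b2 b3 : List Int) (s1 s2 s3 : Nat) :
    (List.range n).foldl (fun cur k =>
        cur + max (b0[k]?.getD 0) (max (b1[(s1 + k) % n]?.getD 0)
                  (max (b2[(s2 + k) % n]?.getD 0) (b3[(s3 + k) % n]?.getD 0)))) 0
      = pvBest n [b0, pvRot b1 s1 n, pvRot b2 s2 n, pvRot b3 s3 n] [] := by
  rw [pv_foldl_add_map]
  simp only [pvBest, zero_add]
  congr 1
  apply List.map_congr_left
  intro k hk
  have hk' : k < n := List.mem_range.mp hk
  simp [pvMaxNE, List.getD_eq_getElem?_getD, pv_rot_getD _ _ _ _ hk', max_assoc]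

lemma pv_case2 (n : Nat) (hn : 0 < n) (b0 b1 : List Int) :
    (List.range n).foldl (fun ans s1 =>
        max ans ((List.range n).foldl (fun cur k =>
          cur + max (b0[k]?.getD 0) (b1[(s1 + k) % n]?.getD 0)) 0)) 0
      = max 0 (pvBest n [b0] [b1]) := by
  have hbody : (fun (ans : Int) (s1 : Nat) =>
      max ans ((List.range n).foldl (fun cur k =>
        cur + max (b0[k]?.getD 0) (b1[(s1 + k) % n]?.getD 0)) 0))
      = fun ans s1 => max ans (pvBest n ([b0] ++ [pvRot b1 s1 n]) []) := by
    funext ans s1; rw [pv_leaf2]; rfl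
  rw [hbody, pv_foldl_maxify _ _ hn]
  rfl

lemma pv_case3 (n : Nat) (hn : 0 < n) (b0 b1 b2 : List Int) :
    (List.range n).foldl (fun ans s1 =>
      (List.range n).foldl (fun ans s2 =>
        max ans ((List.range n).foldl (fun cur k =>
          cur + max (b0[k]?.getD 0) (max (b1[(s1 + k) % n]?.getD 0)
                    (b2[(s2 + k) % n]?.getD 0))) 0)) ans) 0
      = max 0 (pvBest n [b0] [b1, b2]) := by
  have hmid : ∀ (s1 : Nat) (a : Int),
      (List.range n).foldl (fun ans s2 =>
        max ans ((List.range n).foldl (fun cur k =>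
          cur + max (b0[k]?.getD 0) (max (b1[(s1 + k) % n]?.getD 0)
                    (b2[(s2 + k) % n]?.getD 0))) 0)) a
        = max a (pvBest n ([b0] ++ [pvRot b1 s1 n]) [b2]) := by
    intro s1 a
    have hbody : (fun (ans : Int) (s2 : Nat) =>
        max ans ((List.range n).foldl (fun cur k =>
          cur + max (b0[k]?.getD 0) (max (b1[(s1 + k) % n]?.getD 0)
                    (b2[(s2 + k) % n]?.getD 0))) 0))
        = fun ans s2 => max ans (pvBest n (([b0] ++ [pvRot b1 s1 n]) ++ [pvRot b2 s2 n]) []) := by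
      funext ans s2; rw [pv_leaf3]; rfl
    rw [hbody, pv_foldl_maxify _ _ hn]
    rfl
  have houter : (fun (ans : Int) (s1 : Nat) =>
      (List.range n).foldl (fun ans s2 =>
        max ans ((List.range n).foldl (fun cur k =>
          cur + max (b0[k]?.getD 0) (max (b1[(s1 + k) % n]?.getD 0)
                    (b2[(s2 + k) % n]?.getD 0))) 0)) ans)
      = fun ans s1 => max ans (pvBest n ([b0] ++ [pvRot b1 s1 n]) [b2]) := by
    funext ans s1; exact hmid s1 ans
  rw [houter, pv_foldl_maxify _ _ hn]
  rfl

lemma pv_case4 (n : Nat) (hn : 0 < n) (b0 b1 b2 b3 : List Int) :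
    (List.range n).foldl (fun ans s1 =>
      (List.range n).foldl (fun ans s2 =>
        (List.range n).foldl (fun ans s3 =>
          max ans ((List.range n).foldl (fun cur k =>
            cur + max (b0[k]?.getD 0) (max (b1[(s1 + k) % n]?.getD 0)
                      (max (b2[(s2 + k) % n]?.getD 0) (b3[(s3 + k) % n]?.getD 0)))) 0)) ans) ans) 0
      = max 0 (pvBest n [b0] [b1, b2, b3]) := by
  have hin : ∀ (s1 s2 : Nat) (a : Int),
      (List.range n).foldl (fun ans s3 =>
        max ans ((List.range n).foldl (fun cur k =>
          cur + max (b0[k]?.getD 0) (max (b1[(s1 + k) % n]?.getD 0)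
                    (max (b2[(s2 + k) % n]?.getD 0) (b3[(s3 + k) % n]?.getD 0)))) 0)) a
        = max a (pvBest n (([b0] ++ [pvRot b1 s1 n]) ++ [pvRot b2 s2 n]) [b3]) := by
    intro s1 s2 a
    have hbody : (fun (ans : Int) (s3 : Nat) =>
        max ans ((List.range n).foldl (fun cur k =>
          cur + max (b0[k]?.getD 0) (max (b1[(s1 + k) % n]?.getD 0)
                    (max (b2[(s2 + k) % n]?.getD 0) (b3[(s3 + k) % n]?.getD 0)))) 0))
        = fun ans s3 => max ans (pvBest n ((([b0] ++ [pvRot b1 s1 n]) ++ [pvRot b2 s2 n]) ++ [pvRot b3 s3 n]) []) := by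
      funext ans s3; rw [pv_leaf4]; rfl
    rw [hbody, pv_foldl_maxify _ _ hn]
    rfl
  have hmid : ∀ (s1 : Nat) (a : Int),
      (List.range n).foldl (fun ans s2 =>
        (List.range n).foldl (fun ans s3 =>
          max ans ((List.range n).foldl (fun cur k =>
            cur + max (b0[k]?.getD 0) (max (b1[(s1 + k) % n]?.getD 0)
                      (max (b2[(s2 + k) % n]?.getD 0) (b3[(s3 + k) % n]?.getD 0)))) 0)) ans) a
        = max a (pvBest n ([b0] ++ [pvRot b1 s1 n]) [b2, b3]) := by
    intro s1 a
    have hbody : (fun (ans : Int) (s2 : Nat) =>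
        (List.range n).foldl (fun ans s3 =>
          max ans ((List.range n).foldl (fun cur k =>
            cur + max (b0[k]?.getD 0) (max (b1[(s1 + k) % n]?.getD 0)
                      (max (b2[(s2 + k) % n]?.getD 0) (b3[(s3 + k) % n]?.getD 0)))) 0)) ans)
        = fun ans s2 => max ans (pvBest n (([b0] ++ [pvRot b1 s1 n]) ++ [pvRot b2 s2 n]) [b3]) := by
      funext ans s2; exact hin s1 s2 ans
    rw [hbody, pv_foldl_maxify _ _ hn]
    rfl
  have houter : (fun (ans : Int) (s1 : Nat) =>
      (List.range n).foldl (fun ans s2 =>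
        (List.range n).foldl (fun ans s3 =>
          max ans ((List.range n).foldl (fun cur k =>
            cur + max (b0[k]?.getD 0) (max (b1[(s1 + k) % n]?.getD 0)
                      (max (b2[(s2 + k) % n]?.getD 0) (b3[(s3 + k) % n]?.getD 0)))) 0)) ans) ans)
      = fun ans s1 => max ans (pvBest n ([b0] ++ [pvRot b1 s1 n]) [b2, b3]) := by
    funext ans s1; exact hmid s1 ans
  rw [houter, pv_foldl_maxify _ _ hn]
  rfl

lemma pv_prep_len (A : List (List Int)) : (pvPrep A).length ≤ A.length := by
  simp [pvPrep]

-- ===== VERDICT (by name: the statement is the Claim_ definition above) =====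
theorem solve_single_spec : Claim_equal_solve_single := by
  intro A _ _
  unfold Spec_solve_single solve_single solve_single_alt
  have hlen := pv_prep_len A
  rcases hC : pvPrep A with _ | ⟨b0, _ | ⟨b1, _ | ⟨b2, _ | ⟨b3, rest⟩⟩⟩⟩
  · simp
  · simp
  · rw [hC] at hlen
    have hn : 0 < A.length := by simp at hlen; omega
    simp only [List.length_cons, List.length_nil, List.take_succ_cons, List.take_nil,
      pvGet, List.getD]
    norm_num
    exact pv_case2 A.length hn b0 b1
  · rw [hC] at hlen
    have hn : 0 < A.length := by simp at hlen; omega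
    simp only [List.length_cons, List.length_nil, List.take_succ_cons, List.take_nil,
      pvGet, List.getD]
    norm_num
    exact pv_case3 A.length hn b0 b1 b2
  · rw [hC] at hlen
    have hn : 0 < A.length := by simp at hlen; omega
    simp only [List.length_cons, List.take_succ_cons, List.take_zero, pvGet, List.getD]
    rw [if_neg (by omega), if_neg (by omega), if_neg (by omega), if_neg (by omega),
        if_pos (by omega)]
    norm_num
    exact pv_case4 A.length hn b0 b1 b2 b3
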